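-- pv_equiv track=rewrite | github.com/trilogy-data/pytrilogy | trilogy/core/processing/condition_utility.py | boolean_fully_covered
-- ===== SOURCE A (Python) =====
-- def boolean_fully_covered(
--     start: bool,
--     end: bool,
--     ranges: list[tuple[bool, bool]],
-- ) -> bool:
--     return any(r_start is True and r_end is True for r_start, r_end in ranges) and any(
--         r_start is False and r_end is False for r_start, r_end in ranges
--     )
-- ===== SOURCE B (Python) =====
-- def boolean_fully_covered(
--     start: bool,
--     end: bool,
--     ranges: list[tuple[bool, bool]],
-- ) -> bool:
--     seen_tt = False
--     seen_ff = False
--     for r_start, r_end in ranges: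
--         if seen_tt and seen_ff:
--             break
--         if r_start is True and r_end is True:
--             seen_tt = True
--         if r_start is False and r_end is False:
--             seen_ff = True
--     return seen_tt and seen_ff
-- ===== Notes on version B (the rewrite author's own statement) =====
-- stated objective: alternative
-- what changed: Replaced the two separate any() scans over ranges with a single explicit loop maintaining seen_tt/seen_ff flags and breaking once both are set.
import Mathlib
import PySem

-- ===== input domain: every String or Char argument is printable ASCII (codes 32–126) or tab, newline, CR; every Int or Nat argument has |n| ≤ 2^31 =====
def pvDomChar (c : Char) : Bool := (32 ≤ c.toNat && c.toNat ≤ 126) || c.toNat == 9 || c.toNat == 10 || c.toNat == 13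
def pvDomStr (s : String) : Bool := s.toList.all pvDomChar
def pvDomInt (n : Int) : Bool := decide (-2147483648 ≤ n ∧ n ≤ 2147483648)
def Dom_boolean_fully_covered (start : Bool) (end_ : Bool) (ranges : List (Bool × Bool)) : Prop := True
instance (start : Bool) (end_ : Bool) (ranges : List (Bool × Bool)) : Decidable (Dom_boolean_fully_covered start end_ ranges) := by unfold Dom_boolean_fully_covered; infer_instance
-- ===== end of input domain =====

-- ===== PORT A =====
-- two generator scans, as in A
def boolean_fully_covered (start : Bool) (end_ : Bool) (ranges : List (Bool × Bool)) : Bool :=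
  (ranges.any (fun p => p.1 == true && p.2 == true)) &&
  (ranges.any (fun p => p.1 == false && p.2 == false))

-- ===== PORT B =====
-- B: one explicit loop carrying two flags, breaking once both are set
def pvLoop_boolean_fully_covered (seen_tt seen_ff : Bool) : List (Bool × Bool) → Bool
  | [] => seen_tt && seen_ff
  | (r_start, r_end) :: rest =>
    if seen_tt && seen_ff then true
    else
      pvLoop_boolean_fully_covered
        (seen_tt || (r_start == true && r_end == true))
        (seen_ff || (r_start == false && r_end == false)) rest

def boolean_fully_covered_alt (start : Bool) (end_ : Bool) (ranges : List (Bool × Bool)) : Bool :=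
  pvLoop_boolean_fully_covered false false ranges

-- ===== PRECONDITION & SPEC =====
def Spec_boolean_fully_covered (start : Bool) (end_ : Bool) (ranges : List (Bool × Bool)) (out : Bool) : Prop := out = boolean_fully_covered_alt start end_ ranges
instance (start : Bool) (end_ : Bool) (ranges : List (Bool × Bool)) (out : Bool) : Decidable (Spec_boolean_fully_covered start end_ ranges out) := by unfold Spec_boolean_fully_covered; infer_instance

-- ===== CLAIM (what is proved, stated in full; the proofs are below) =====
def Claim_equal_boolean_fully_covered : Prop := ∀ (start : Bool) (end_ : Bool) (ranges : List (Bool × Bool)), Dom_boolean_fully_covered start end_ ranges → Spec_boolean_fully_covered start end_ ranges (boolean_fully_covered start end_ ranges)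

-- ===== LEMMAS AND PROOFS =====


-- ===== VERDICT (by name: the statement is the Claim_ definition above) =====
theorem pvLoop_eq (l : List (Bool × Bool)) : ∀ tt ff : Bool,
    pvLoop_boolean_fully_covered tt ff l =
      ((tt || l.any (fun p => p.1 == true && p.2 == true)) &&
       (ff || l.any (fun p => p.1 == false && p.2 == false))) := by
  induction l with
  | nil => intro tt ff; simp [pvLoop_boolean_fully_covered]
  | cons hd tl ih =>
    intro tt ff
    obtain ⟨a, b⟩ := hd
    simp only [pvLoop_boolean_fully_covered]
    by_cases h : (tt && ff) = true
    · simp [h]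
      cases tt <;> cases ff <;> simp_all
    · rw [if_neg h, ih]
      cases a <;> cases b <;> cases tt <;> cases ff <;> simp_all [List.any_cons]

theorem boolean_fully_covered_spec : Claim_equal_boolean_fully_covered := by
  intro start end_ ranges _
  unfold Spec_boolean_fully_covered boolean_fully_covered boolean_fully_covered_alt
  rw [pvLoop_eq]
  simp
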